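-- pv_equiv track=rewrite | github.com/prodeveloperpy-hash/Tooli_UK | Backend/tooli_uk_app/management/commands/seed_reference_data.py | _to_category_key
-- ===== SOURCE A (Python) =====
-- def _to_category_key(display_name: str) -> str:
--     key = display_name.lower()
--     replacements = (
--         ("&", " and "),
--         ("/", " "),
--         ("+", " plus "),
--         ("(", " "),
--         (")", " "),
--         (",", " "),
--         ("-", " "),
--     )
--     for old, new in replacements:
--         key = key.replace(old, new)
--     return "_".join(part for part in key.split() if part).upper()
-- ===== SOURCE B (Python) =====
-- def _to_category_key(display_name: str) -> str:
--     tokens = []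
--     buf = []
--     for ch in display_name.lower():
--         if ch.isspace() or ch in "/(),-":
--             if buf:
--                 tokens.append("".join(buf))
--                 buf = []
--         elif ch == "&":
--             if buf:
--                 tokens.append("".join(buf))
--                 buf = []
--             tokens.append("and")
--         elif ch == "+":
--             if buf:
--                 tokens.append("".join(buf))
--                 buf = []
--             tokens.append("plus")
--         else:
--             buf.append(ch)
--     if buf:
--         tokens.append("".join(buf))
--     return "_".join(tokens).upper()
-- ===== Notes on version B (the rewrite author's own statement) =====
-- stated objective: alternative
-- what changed: Replaces A's seven sequential str.replace passes followed by split()/join by a single left-to-right scan that maintains a current-word buffer and appends completed tokens (emitting 'and'/'plus' directly for '&'/'+'), then joins once.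
import Mathlib
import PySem

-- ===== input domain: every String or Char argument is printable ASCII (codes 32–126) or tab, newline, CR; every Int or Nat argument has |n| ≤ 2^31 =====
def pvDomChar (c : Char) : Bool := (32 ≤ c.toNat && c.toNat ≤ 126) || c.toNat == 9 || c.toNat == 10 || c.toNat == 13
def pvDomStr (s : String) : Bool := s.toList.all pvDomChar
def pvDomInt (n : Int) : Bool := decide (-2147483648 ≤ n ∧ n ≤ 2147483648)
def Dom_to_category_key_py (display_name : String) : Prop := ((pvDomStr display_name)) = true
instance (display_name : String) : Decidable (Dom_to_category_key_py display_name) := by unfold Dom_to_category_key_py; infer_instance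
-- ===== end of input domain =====

-- B replaces A's seven sequential .replace passes + re-split by a single left-to-right scan
-- that builds the token list directly (objective: alternative, one pass instead of eight).

-- ===== PORT A =====
def to_category_key_py (display_name : String) : String :=
  let key0 := PySem.Str.lower display_name
  let replacements : List (String × String) :=
    [("&", " and "), ("/", " "), ("+", " plus "), ("(", " "), (")", " "), (",", " "), ("-", " ")]
  let key := replacements.foldl (fun k p => PySem.Str.replace k p.1 p.2) key0
  PySem.Str.upper (PySem.Str.join "_" ((PySem.Str.split₀ key).filter (fun p => decide (p ≠ ""))))

-- ===== PORT B =====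
-- one-pass scan: buf is the current word, toks the completed tokens (both in order)
def altGo : List Char → List Char → List (List Char) → List (List Char)
  | [], buf, toks => if buf = [] then toks else toks ++ [buf]
  | c :: cs, buf, toks =>
    if PySem.Chars.isspace c || c ∈ ['/', '(', ')', ',', '-'] then
      altGo cs [] (if buf = [] then toks else toks ++ [buf])
    else if c = '&' then
      altGo cs [] ((if buf = [] then toks else toks ++ [buf]) ++ ["and".toList])
    else if c = '+' then
      altGo cs [] ((if buf = [] then toks else toks ++ [buf]) ++ ["plus".toList])
    else
      altGo cs (buf ++ [c]) toks

def to_category_key_py_alt (display_name : String) : String :=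
  String.ofList (PySem.Chars.upper
    (PySem.Chars.join ['_'] (altGo (PySem.Chars.lower display_name.toList) [] [])))

-- ===== PRECONDITION & SPEC =====
def Spec_to_category_key_py (display_name : String) (out : String) : Prop := out = to_category_key_py_alt display_name
instance (display_name : String) (out : String) : Decidable (Spec_to_category_key_py display_name out) := by unfold Spec_to_category_key_py; infer_instance

-- ===== CLAIM (what is proved, stated in full; the proofs are below) =====
def Claim_equal_to_category_key_py : Prop := ∀ (display_name : String), Dom_to_category_key_py display_name → Spec_to_category_key_py display_name (to_category_key_py display_name)

-- ===== LEMMAS AND PROOFS =====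

-- per-character expansion that the seven .replace passes jointly perform
def expCh (c : Char) : List Char :=
  if c = '&' then " and ".toList
  else if c = '/' then [' ']
  else if c = '+' then " plus ".toList
  else if c = '(' then [' ']
  else if c = ')' then [' ']
  else if c = ',' then [' ']
  else if c = '-' then [' ']
  else [c]

-- reference tokenizer (forward style), common reduct of both sides
def tok : List Char → List Char → List (List Char)
  | [], buf => if buf = [] then [] else [buf]
  | c :: cs, buf =>
    if PySem.Chars.isspace c || c ∈ ['/', '(', ')', ',', '-'] then
      (if buf = [] then [] else [buf]) ++ tok cs []
    else if c = '&' then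
      (if buf = [] then [] else [buf]) ++ ["and".toList] ++ tok cs []
    else if c = '+' then
      (if buf = [] then [] else [buf]) ++ ["plus".toList] ++ tok cs []
    else
      tok cs (buf ++ [c])

-- single-character replace is a flatMap
theorem replace_go_single (o : Char) (new : List Char) :
    ∀ (fuel : Nat) (l acc : List Char), l.length ≤ fuel →
      PySem.Chars.replace.go [o] new fuel l acc =
        acc.reverse ++ l.flatMap (fun c => if c = o then new else [c]) := by
  intro fuel
  induction fuel with
  | zero =>
    intro l acc h
    have : l = [] := List.eq_nil_of_length_eq_zero (Nat.le_zero.mp h)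
    subst this
    simp [PySem.Chars.replace.go]
  | succ n ih =>
    intro l acc h
    cases l with
    | nil => simp [PySem.Chars.replace.go]
    | cons c t =>
      by_cases hc : c = o
      · subst hc
        have hp : List.isPrefixOf [c] (c :: t) = true := by
          simp [List.isPrefixOf]
        rw [PySem.Chars.replace.go, if_pos hp]
        rw [ih _ _ (by simpa using Nat.le_of_succ_le_succ h)]
        simp
      · have hp : List.isPrefixOf [o] (c :: t) = false := by
          simp [List.isPrefixOf]; exact fun hh => (hc hh.symm).elim
        rw [PySem.Chars.replace.go, if_neg (by simp [hp])]
        rw [ih _ _ (by simpa using Nat.le_of_succ_le_succ h)]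
        simp [hc]

theorem replace_single (o : Char) (new s : List Char) :
    PySem.Chars.replace s [o] new = s.flatMap (fun c => if c = o then new else [c]) := by
  rw [PySem.Chars.replace, if_neg (by simp)]
  simpa using replace_go_single o new s.length s [] (le_refl _)

-- the seven sequential replaces equal one flatMap of expCh
theorem chain_eq_flatMap (s : List Char) :
    (PySem.Chars.replace (PySem.Chars.replace (PySem.Chars.replace (PySem.Chars.replace
      (PySem.Chars.replace (PySem.Chars.replace (PySem.Chars.replace s
        "&".toList " and ".toList) "/".toList " ".toList) "+".toList " plus ".toList)
        "(".toList " ".toList) ")".toList " ".toList) ",".toList " ".toList)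
        "-".toList " ".toList) = s.flatMap expCh := by
  have h1 : ("&".toList : List Char) = ['&'] := rfl
  simp only [show ("&".toList : List Char) = ['&'] from rfl,
    show ("/".toList : List Char) = ['/'] from rfl,
    show ("+".toList : List Char) = ['+'] from rfl,
    show ("(".toList : List Char) = ['('] from rfl,
    show (")".toList : List Char) = [')'] from rfl,
    show (",".toList : List Char) = [','] from rfl,
    show ("-".toList : List Char) = ['-'] from rfl,
    replace_single, List.flatMap_assoc]
  apply List.flatMap_congr
  intro c _
  by_cases h1 : c = '&'; · subst h1; decide
  by_cases h2 : c = '/'; · subst h2; decide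
  by_cases h3 : c = '+'; · subst h3; decide
  by_cases h4 : c = '('; · subst h4; decide
  by_cases h5 : c = ')'; · subst h5; decide
  by_cases h6 : c = ','; · subst h6; decide
  by_cases h7 : c = '-'; · subst h7; decide
  simp [expCh, h1, h2, h3, h4, h5, h6, h7]

-- unfolding lemmas for tok
theorem tok_cons_sep (c : Char) (cs buf : List Char)
    (h : (PySem.Chars.isspace c || c ∈ ['/', '(', ')', ',', '-']) = true) :
    tok (c :: cs) buf = (if buf = [] then [] else [buf]) ++ tok cs [] := by
  simp only [tok]
  rw [if_pos h]

theorem tok_cons_amp (cs buf : List Char) :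
    tok ('&' :: cs) buf = (if buf = [] then [] else [buf]) ++ ["and".toList] ++ tok cs [] := by
  simp only [tok]
  rw [if_neg (by decide)]
  simp

theorem tok_cons_plus (cs buf : List Char) :
    tok ('+' :: cs) buf = (if buf = [] then [] else [buf]) ++ ["plus".toList] ++ tok cs [] := by
  simp only [tok]
  rw [if_neg (by decide), if_neg (by decide)]
  simp

theorem tok_cons_plain (c : Char) (cs buf : List Char)
    (h : (PySem.Chars.isspace c || c ∈ ['/', '(', ')', ',', '-']) = false)
    (ha : c ≠ '&') (hp : c ≠ '+') :
    tok (c :: cs) buf = tok cs (buf ++ [c]) := by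
  simp only [tok]
  rw [if_neg (by simp at h ⊢; tauto), if_neg ha, if_neg hp]

-- splitting the expanded string is the reference tokenizer
theorem split_expand (cs : List Char) :
    ∀ (cur : List Char) (acc : List (List Char)),
      PySem.Chars.split₀.go (cs.flatMap expCh) cur acc =
        acc.reverse ++ tok cs cur.reverse := by
  induction cs with
  | nil =>
    intro cur acc
    cases cur with
    | nil => simp [PySem.Chars.split₀.go, tok]
    | cons c t => simp [PySem.Chars.split₀.go, tok]
  | cons c cs ih =>
    intro cur acc
    by_cases hs : PySem.Chars.isspace c = true
    · have hne : expCh c = [c] := by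
        have h1 : c ≠ '&' := by rintro rfl; revert hs; decide
        have h2 : c ≠ '/' := by rintro rfl; revert hs; decide
        have h3 : c ≠ '+' := by rintro rfl; revert hs; decide
        have h4 : c ≠ '(' := by rintro rfl; revert hs; decide
        have h5 : c ≠ ')' := by rintro rfl; revert hs; decide
        have h6 : c ≠ ',' := by rintro rfl; revert hs; decide
        have h7 : c ≠ '-' := by rintro rfl; revert hs; decide
        simp [expCh, h1, h2, h3, h4, h5, h6, h7]
      rw [List.flatMap_cons, hne,
        tok_cons_sep c cs cur.reverse (by simp [hs])]
      cases cur with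
      | nil =>
        rw [show ([c] ++ cs.flatMap expCh) = c :: cs.flatMap expCh from rfl,
          PySem.Chars.split₀.go, if_pos hs, if_pos (by simp)]
        rw [ih [] acc]
        simp
      | cons d t =>
        rw [show ([c] ++ cs.flatMap expCh) = c :: cs.flatMap expCh from rfl,
          PySem.Chars.split₀.go, if_pos hs, if_neg (by simp)]
        rw [ih [] ((d :: t).reverse :: acc)]
        simp
    · by_cases hsp : c ∈ ['/', '(', ')', ',', '-']
      · -- separator punctuation: expands to a single space
        have hne : expCh c = [' '] := by fin_cases hsp <;> decide
        rw [List.flatMap_cons, hne,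
          tok_cons_sep c cs cur.reverse (by simp [hsp])]
        cases cur with
        | nil =>
          rw [show ([' '] ++ cs.flatMap expCh) = ' ' :: cs.flatMap expCh from rfl,
            PySem.Chars.split₀.go, if_pos (by decide), if_pos (by simp)]
          rw [ih [] acc]
          simp
        | cons d t =>
          rw [show ([' '] ++ cs.flatMap expCh) = ' ' :: cs.flatMap expCh from rfl,
            PySem.Chars.split₀.go, if_pos (by decide), if_neg (by simp)]
          rw [ih [] ((d :: t).reverse :: acc)]
          simp
      · by_cases ha : c = '&'
        · subst ha
          rw [List.flatMap_cons, show expCh '&' = [' ', 'a', 'n', 'd', ' '] from rfl,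
            tok_cons_amp cs cur.reverse]
          rw [show ([' ', 'a', 'n', 'd', ' '] ++ cs.flatMap expCh)
              = ' ' :: 'a' :: 'n' :: 'd' :: ' ' :: cs.flatMap expCh from rfl]
          cases cur with
          | nil =>
            rw [PySem.Chars.split₀.go, if_pos (by decide), if_pos (by simp)]
            rw [PySem.Chars.split₀.go, if_neg (by decide)]
            rw [PySem.Chars.split₀.go, if_neg (by decide)]
            rw [PySem.Chars.split₀.go, if_neg (by decide)]
            rw [PySem.Chars.split₀.go, if_pos (by decide), if_neg (by simp)]
            rw [ih [] (['d', 'n', 'a'].reverse :: acc)]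
            simp
          | cons d t =>
            rw [PySem.Chars.split₀.go, if_pos (by decide), if_neg (by simp)]
            rw [PySem.Chars.split₀.go, if_neg (by decide)]
            rw [PySem.Chars.split₀.go, if_neg (by decide)]
            rw [PySem.Chars.split₀.go, if_neg (by decide)]
            rw [PySem.Chars.split₀.go, if_pos (by decide), if_neg (by simp)]
            rw [ih [] (['d', 'n', 'a'].reverse :: (d :: t).reverse :: acc)]
            simp
        · by_cases hpl : c = '+'
          · subst hpl
            rw [List.flatMap_cons, show expCh '+' = [' ', 'p', 'l', 'u', 's', ' '] from rfl,
              tok_cons_plus cs cur.reverse]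
            rw [show ([' ', 'p', 'l', 'u', 's', ' '] ++ cs.flatMap expCh)
                = ' ' :: 'p' :: 'l' :: 'u' :: 's' :: ' ' :: cs.flatMap expCh from rfl]
            cases cur with
            | nil =>
              rw [PySem.Chars.split₀.go, if_pos (by decide), if_pos (by simp)]
              rw [PySem.Chars.split₀.go, if_neg (by decide)]
              rw [PySem.Chars.split₀.go, if_neg (by decide)]
              rw [PySem.Chars.split₀.go, if_neg (by decide)]
              rw [PySem.Chars.split₀.go, if_neg (by decide)]
              rw [PySem.Chars.split₀.go, if_pos (by decide), if_neg (by simp)]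
              rw [ih [] (['s', 'u', 'l', 'p'].reverse :: acc)]
              simp
            | cons d t =>
              rw [PySem.Chars.split₀.go, if_pos (by decide), if_neg (by simp)]
              rw [PySem.Chars.split₀.go, if_neg (by decide)]
              rw [PySem.Chars.split₀.go, if_neg (by decide)]
              rw [PySem.Chars.split₀.go, if_neg (by decide)]
              rw [PySem.Chars.split₀.go, if_neg (by decide)]
              rw [PySem.Chars.split₀.go, if_pos (by decide), if_neg (by simp)]
              rw [ih [] (['s', 'u', 'l', 'p'].reverse :: (d :: t).reverse :: acc)]
              simp
          · -- plain character
            have h1 : c ≠ '/' := by intro h; exact hsp (by simp [h])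
            have h2 : c ≠ '(' := by intro h; exact hsp (by simp [h])
            have h3 : c ≠ ')' := by intro h; exact hsp (by simp [h])
            have h4 : c ≠ ',' := by intro h; exact hsp (by simp [h])
            have h5 : c ≠ '-' := by intro h; exact hsp (by simp [h])
            have hne : expCh c = [c] := by
              simp [expCh, ha, hpl, h1, h2, h3, h4, h5]
            rw [List.flatMap_cons, hne,
              tok_cons_plain c cs cur.reverse (by simp [hs, h1, h2, h3, h4, h5]) ha hpl]
            rw [show ([c] ++ cs.flatMap expCh) = c :: cs.flatMap expCh from rfl,
              PySem.Chars.split₀.go, if_neg (by simp [hs])]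
            rw [ih (c :: cur) acc]
            simp

-- tokens of tok are never empty
theorem tok_ne_nil (cs : List Char) : ∀ buf, [] ∉ tok cs buf := by
  induction cs with
  | nil =>
    intro buf
    simp only [tok]
    split_ifs <;> simp_all
  | cons c cs ih =>
    intro buf
    simp only [tok]
    split_ifs <;> simp_all

-- altGo in terms of tok
theorem altGo_eq_tok (cs : List Char) :
    ∀ buf toks, altGo cs buf toks = toks ++ tok cs buf := by
  induction cs with
  | nil =>
    intro buf toks
    simp only [altGo, tok]
    split_ifs <;> simp
  | cons c cs ih =>
    intro buf toks
    simp only [altGo, tok]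
    split_ifs <;> simp [ih]

-- ===== VERDICT (by name: the statement is the Claim_ definition above) =====
theorem to_category_key_py_spec : Claim_equal_to_category_key_py := by
  intro dn _
  unfold Spec_to_category_key_py to_category_key_py to_category_key_py_alt
  apply String.toList_inj.mp
  show (PySem.Str.upper (PySem.Str.join "_" ((PySem.Str.split₀
      ([(("&" : String), (" and " : String)), ("/", " "), ("+", " plus "), ("(", " "),
        (")", " "), (",", " "), ("-", " ")].foldl
        (fun k p => PySem.Str.replace k p.1 p.2) (PySem.Str.lower dn))).filter
        (fun p => decide (p ≠ ""))))).toList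
    = (String.ofList (PySem.Chars.upper
        (PySem.Chars.join ['_'] (altGo (PySem.Chars.lower dn.toList) [] [])))).toList
  have hkey :
      ([(("&" : String), (" and " : String)), ("/", " "), ("+", " plus "), ("(", " "),
        (")", " "), (",", " "), ("-", " ")].foldl
        (fun k p => PySem.Str.replace k p.1 p.2) (PySem.Str.lower dn)).toList
        = (PySem.Chars.lower dn.toList).flatMap expCh := by
    simp only [List.foldl, PySem.Str.toList_replace, PySem.Str.toList_lower]
    exact chain_eq_flatMap _
  have hsplit :
      List.map String.toList ((PySem.Str.split₀
        ([(("&" : String), (" and " : String)), ("/", " "), ("+", " plus "), ("(", " "),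
          (")", " "), (",", " "), ("-", " ")].foldl
          (fun k p => PySem.Str.replace k p.1 p.2) (PySem.Str.lower dn))))
        = tok (PySem.Chars.lower dn.toList) [] := by
    rw [PySem.Str.split₀_map_toList, hkey]
    have := split_expand (PySem.Chars.lower dn.toList) [] []
    simpa [PySem.Chars.split₀] using this
  have hfilter :
      ((PySem.Str.split₀
        ([(("&" : String), (" and " : String)), ("/", " "), ("+", " plus "), ("(", " "),
          (")", " "), (",", " "), ("-", " ")].foldl
          (fun k p => PySem.Str.replace k p.1 p.2) (PySem.Str.lower dn))).filter
          (fun p => decide (p ≠ "")))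
        = (PySem.Str.split₀
        ([(("&" : String), (" and " : String)), ("/", " "), ("+", " plus "), ("(", " "),
          (")", " "), (",", " "), ("-", " ")].foldl
          (fun k p => PySem.Str.replace k p.1 p.2) (PySem.Str.lower dn))) := by
    apply List.filter_eq_self.mpr
    intro p hp
    simp only [decide_eq_true_eq]
    intro hcontra
    subst hcontra
    have hmem : ("" : String).toList ∈ List.map String.toList (PySem.Str.split₀
        ([(("&" : String), (" and " : String)), ("/", " "), ("+", " plus "), ("(", " "),
          (")", " "), (",", " "), ("-", " ")].foldl
          (fun k p => PySem.Str.replace k p.1 p.2) (PySem.Str.lower dn))) :=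
      List.mem_map_of_mem hp
    rw [hsplit] at hmem
    exact tok_ne_nil _ [] hmem
  rw [hfilter]
  simp only [PySem.Str.toList_upper, PySem.Str.toList_join, hsplit,
    altGo_eq_tok, List.nil_append]
  simp
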